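-- pv_equiv track=rewrite | github.com/YASHwanth-1411/CS6024-Comp-Bio | sg_BWT.py | estimate_edge_weights
-- ===== SOURCE A (Python) =====
-- from collections import defaultdict, deque, Counter
--
-- def estimate_edge_weights(graph, reads):
--     edge_weights = defaultdict(int)
--     label_count = Counter()
--     for _, label in graph.items():
--         label_count[label] += 1
--     for edge, label in graph.items():
--         edge_weights[edge] = label_count[label]
--     return edge_weights
-- ===== SOURCE B (Python) =====
-- from collections import defaultdict
--
-- def estimate_edge_weights(graph, reads):
--     # One pass, no counting pre-pass: keep the edges of each label seen so far
--     # and re-stamp the whole group with its current size whenever it grows.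
--     edge_weights = defaultdict(int)
--     seen = defaultdict(list)
--     for edge, label in graph.items():
--         group = seen[label]
--         group.append(edge)
--         w = len(group)
--         for e in group:
--             edge_weights[e] = w
--     return edge_weights
-- ===== Notes on version B (the rewrite author's own statement) =====
-- stated objective: alternative
-- what changed: Replaces A's Counter pre-pass plus assignment pass by a single incremental pass that keeps, per label, the list of edges seen so far and re-stamps the whole group with its current size each time the label reappears; no frequency table is ever built.
import Mathlib
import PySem

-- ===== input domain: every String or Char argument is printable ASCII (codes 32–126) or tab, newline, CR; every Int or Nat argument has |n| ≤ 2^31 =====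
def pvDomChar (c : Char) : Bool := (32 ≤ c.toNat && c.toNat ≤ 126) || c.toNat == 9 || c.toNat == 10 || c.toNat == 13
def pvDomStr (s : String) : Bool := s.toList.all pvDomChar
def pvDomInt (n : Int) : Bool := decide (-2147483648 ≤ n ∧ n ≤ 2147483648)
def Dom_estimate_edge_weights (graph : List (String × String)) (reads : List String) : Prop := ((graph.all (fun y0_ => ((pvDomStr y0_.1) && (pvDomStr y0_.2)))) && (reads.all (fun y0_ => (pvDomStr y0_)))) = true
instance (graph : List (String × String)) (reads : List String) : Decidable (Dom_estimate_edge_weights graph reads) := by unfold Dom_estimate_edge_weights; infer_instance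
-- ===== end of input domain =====

-- B replaces A's Counter pre-pass + assignment pass by a single incremental pass: it keeps the list of
-- edges of each label seen so far and re-stamps that whole group with its current size whenever it grows
-- (alternative decomposition; not claimed faster).

-- ===== PORT A =====
def estimate_edge_weights (graph : List (String × String)) (reads : List String) : List (String × Int) :=
  let label_count : PySem.Dict String Int :=
    graph.foldl (fun c p => c.modify p.2 0 (· + 1)) PySem.Dict.empty
  (graph.foldl (fun (ew : PySem.Dict String Int) p => ew.insert p.1 (label_count.getD p.2 0))
    PySem.Dict.empty).items

-- ===== PORT B =====
-- one loop iteration of B: grow the label's group, then stamp every edge of the group with its size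
def ewStep (st : PySem.Dict String (List String) × PySem.Dict String Int) (p : String × String) :
    PySem.Dict String (List String) × PySem.Dict String Int :=
  let group := st.1.getD p.2 [] ++ [p.1]
  let seen := st.1.insert p.2 group
  let ew := group.foldl (fun ew e => ew.insert e ((group.length : Nat) : Int)) st.2
  (seen, ew)

def estimate_edge_weights_alt (graph : List (String × String)) (reads : List String) : List (String × Int) :=
  (graph.foldl ewStep (PySem.Dict.empty, PySem.Dict.empty)).2.items

-- ===== PRECONDITION & SPEC =====
-- graph is a Python dict, so its keys are distinct; Pre_ states exactly that (an association list with
-- duplicate keys does not correspond to any Python input).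
def Pre_estimate_edge_weights (graph : List (String × String)) (reads : List String) : Prop :=
  (graph.map Prod.fst).Nodup
instance (graph : List (String × String)) (reads : List String) : Decidable (Pre_estimate_edge_weights graph reads) := by unfold Pre_estimate_edge_weights; infer_instance

def pvWitness_estimate_edge_weights : (List (String × String)) × List String :=
  ([("AB", "A"), ("BC", "B"), ("CA", "A")], ["ABC"])

def Spec_estimate_edge_weights (graph : List (String × String)) (reads : List String) (out : List (String × Int)) : Prop := out = estimate_edge_weights_alt graph reads
instance (graph : List (String × String)) (reads : List String) (out : List (String × Int)) : Decidable (Spec_estimate_edge_weights graph reads out) := by unfold Spec_estimate_edge_weights; infer_instance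

-- ===== CLAIM (what is proved, stated in full; the proofs are below) =====
def Claim_equal_estimate_edge_weights : Prop := ∀ (graph : List (String × String)) (reads : List String), Dom_estimate_edge_weights graph reads → Pre_estimate_edge_weights graph reads → Spec_estimate_edge_weights graph reads (estimate_edge_weights graph reads)

-- ===== LEMMAS AND PROOFS =====

-- the `seen` component of B's fold is exactly the grouping-by-label fold
theorem fst_foldl_ewStep (l : List (String × String))
    (st : PySem.Dict String (List String) × PySem.Dict String Int) :
    (l.foldl ewStep st).1 = l.foldl (fun d p => d.modify p.2 [] (· ++ [p.1])) st.1 := by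
  induction l generalizing st with
  | nil => rfl
  | cons p l ih => exact ih _

-- overwriting a set of already-present keys with a constant value maps the items in place
theorem items_foldl_insert_const (es : List String) (w : Int) (d : PySem.Dict String Int)
    (hsub : ∀ e ∈ es, d.contains e = true) :
    (es.foldl (fun d e => d.insert e w) d).items
      = d.items.map (fun kv => if kv.1 ∈ es then (kv.1, w) else kv) := by
  induction es generalizing d with
  | nil => simp
  | cons e es ih =>
    have hce : d.contains e = true := hsub e (by simp)
    have hsub' : ∀ x ∈ es, (d.insert e w).contains x = true := by
      intro x hx
      rw [PySem.Dict.contains_insert]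
      simp [hsub x (List.mem_cons_of_mem _ hx)]
    simp only [List.foldl_cons]
    rw [ih (d.insert e w) hsub', PySem.Dict.items_insert_of_contains _ _ hce, List.map_map]
    apply List.map_congr_left
    intro kv _
    by_cases hk : kv.1 = e
    · simp [hk]
    · simp [hk, beq_iff_eq]

-- the invariant of B's single pass: after the whole fold, the weights dict lists the edges in
-- input order, each mapped to the total count of its label
theorem ew_items_foldl (l : List (String × String)) (hnd : (l.map Prod.fst).Nodup) :
    (l.foldl ewStep (PySem.Dict.empty, PySem.Dict.empty)).2.items
      = l.map (fun p => (p.1, ((l.map Prod.snd).count p.2 : Int))) := by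
  induction l using List.reverseRecOn with
  | nil => rfl
  | append_singleton l q ih =>
    have hndl : (l.map Prod.fst).Nodup := by
      simpa using (List.nodup_append.mp (by simpa using hnd)).1
    have hqfresh : q.1 ∉ l.map Prod.fst := by
      have := (List.nodup_append.mp (by simpa using hnd)).2.2
      intro hm
      simpa using this q.1 hm
    -- unfold one step of the fold
    rw [List.foldl_append]
    simp only [List.foldl_cons, List.foldl_nil]
    -- the group accumulated for q's label
    have hseen : (l.foldl ewStep (PySem.Dict.empty, PySem.Dict.empty)).1.getD q.2 []
        = (l.filter (fun p => p.2 == q.2)).map Prod.fst := by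
      rw [fst_foldl_ewStep]
      have : l.foldl (fun (d : PySem.Dict String (List String)) p => d.modify p.2 [] (· ++ [p.1]))
          PySem.Dict.empty
          = (l.map Prod.swap).foldl (fun d p => d.modify p.1 [] (· ++ [p.2])) PySem.Dict.empty := by
        rw [List.foldl_map]; rfl
      rw [this, PySem.Dict.getD_foldl_modify_append]
      simp [List.filter_map, Function.comp_def]
    set cnt : String → Nat := fun c => (l.map Prod.snd).count c with hcnt
    have hlen : ((l.filter (fun p => p.2 == q.2)).map Prod.fst).length = cnt q.2 := by
      rw [List.length_map, ← List.countP_eq_length_filter, hcnt]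
      simp [List.count, List.countP_map, Function.comp_def]
    -- keys present in the accumulated weights dict
    have hkeys : (l.foldl ewStep (PySem.Dict.empty, PySem.Dict.empty)).2.keys = l.map Prod.fst := by
      have : (l.foldl ewStep (PySem.Dict.empty, PySem.Dict.empty)).2.keys
          = ((l.foldl ewStep (PySem.Dict.empty, PySem.Dict.empty)).2.items).map Prod.fst := rfl
      rw [this, ih hndl, List.map_map]
      rfl
    have hcont : ∀ e ∈ (l.filter (fun p => p.2 == q.2)).map Prod.fst,
        (l.foldl ewStep (PySem.Dict.empty, PySem.Dict.empty)).2.contains e = true := by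
      intro e he
      rw [PySem.Dict.contains_eq_decide_mem_keys, hkeys]
      have : e ∈ l.map Prod.fst := by
        rcases List.mem_map.mp he with ⟨p, hp, rfl⟩
        exact List.mem_map_of_mem (List.mem_of_mem_filter hp)
      simpa using this
    have hqnc : (l.foldl ewStep (PySem.Dict.empty, PySem.Dict.empty)).2.contains q.1 = false := by
      rw [PySem.Dict.contains_eq_decide_mem_keys, hkeys]
      simpa using hqfresh
    -- evaluate the step
    simp only [ewStep]
    rw [hseen]
    set es := (l.filter (fun p => p.2 == q.2)).map Prod.fst with hes
    have hw : ((es ++ [q.1]).length : Int) = (cnt q.2 : Int) + 1 := by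
      simp [hlen]
    rw [List.foldl_append]
    simp only [List.foldl_cons, List.foldl_nil]
    have hqc2 : ((es.foldl (fun d e => d.insert e (((es ++ [q.1]).length : Nat) : Int))
        (l.foldl ewStep (PySem.Dict.empty, PySem.Dict.empty)).2).contains q.1) = false := by
      rw [PySem.Dict.contains_eq_decide_mem_keys, PySem.Dict.keys_foldl_insert]
      have hq1es : q.1 ∉ es := by
        intro hm
        rcases List.mem_map.mp hm with ⟨p, hp, hpq⟩
        exact hqfresh (hpq ▸ List.mem_map_of_mem (List.mem_of_mem_filter hp))
      have : q.1 ∉ PySem.Set.update (l.foldl ewStep (PySem.Dict.empty, PySem.Dict.empty)).2.keys es := by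
        rw [PySem.Set.mem_update]
        rintro (h | h)
        · rw [hkeys] at h; exact hqfresh h
        · exact hq1es h
      simpa using this
    rw [PySem.Dict.items_insert_of_not_contains _ _ hqc2,
      items_foldl_insert_const es _ _ hcont]
    rw [ih hndl, List.map_map]
    -- both sides are now explicit maps over l plus the new last entry
    rw [List.map_append]
    congr 1
    · apply List.map_congr_left
      intro p hp
      have hmemes : p.1 ∈ es ↔ p.2 = q.2 := by
        constructor
        · intro hm
          rcases List.mem_map.mp hm with ⟨p', hp', hpp⟩
          have hp'l := List.mem_of_mem_filter hp'
          have hp'q : p'.2 = q.2 := by simpa using List.of_mem_filter hp'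
          have : p' = p := List.inj_on_of_nodup_map hndl hp'l hp hpp
          rw [← this]; exact hp'q
        · intro h2
          exact List.mem_map_of_mem (List.mem_filter.mpr ⟨hp, by simpa using h2⟩)
      by_cases h2 : p.2 = q.2
      · simp [hmemes, h2, hlen, hcnt]
      · simp [hmemes, h2, Ne.symm h2]
    · simp [List.count_append, List.count_cons, hcnt, hlen]

-- A's Counter built by folding over the pairs is PySem.Dict.counter of the label list
theorem counter_fold_eq (graph : List (String × String)) :
    graph.foldl (fun (c : PySem.Dict String Int) p => c.modify p.2 0 (· + 1)) PySem.Dict.empty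
      = PySem.Dict.counter (graph.map Prod.snd) := by
  rw [PySem.Dict.counter_eq_foldl, List.foldl_map]

-- ===== VERDICT (by name: the statement is the Claim_ definition above) =====
theorem estimate_edge_weights_spec : Claim_equal_estimate_edge_weights := by
  intro graph reads _ hpre
  unfold Spec_estimate_edge_weights estimate_edge_weights estimate_edge_weights_alt
  rw [ew_items_foldl graph hpre]
  simp only [counter_fold_eq]
  have hfresh : ∀ p ∈ graph, (PySem.Dict.empty : PySem.Dict String Int).contains p.1 = false := by
    intro p _; simp
  rw [PySem.Dict.items_foldl_insert_fresh _ _ _ _ hfresh hpre]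
  have hemp : (PySem.Dict.empty : PySem.Dict String Int).items = [] := rfl
  rw [hemp]
  simp [PySem.Dict.getD_counter]
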